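-- pv_equiv track=rewrite | github.com/monteirotorres/HieraGO | ProteGo.py | codify_proteome
-- ===== SOURCE A (Python) =====
-- def codify_proteome(go_dict, hierago_reverse):
--     '''
--     Receives the dictionary parsed from csv file and the dictionary correlating
--     GO terms with hierarchical codes and returns a dictionary assigning  a list
--     of hierarchical codes for each protein
--     '''
--     coded_godict = {}
--     for gene, go_terms in go_dict.items():
--         for go in go_terms:
--             if go in hierago_reverse:
--                 if gene in coded_godict:
--                     for code in hierago_reverse[go]:
--                         if code not in coded_godict[gene]:
--                             coded_godict[gene].append(code)
--                             # coded_godict[gene].append(code+'.-')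
--                 else:
--                     coded_godict[gene] = []
--                     for code in hierago_reverse[go]:
--                         if code not in coded_godict[gene]:
--                             coded_godict[gene].append(code)
--                             # coded_godict[gene].append(code+'.-')
--     for gene, go_terms in go_dict.items():
--         if gene not in coded_godict:
--             coded_godict[gene] = ['Undefined']
--     return coded_godict
-- ===== SOURCE B (Python) =====
-- def _dedup(codes):
--     '''Keep-first dedup by head-removal recursion.'''
--     if not codes:
--         return []
--     head = codes[0]
--     return [head] + _dedup([c for c in codes[1:] if c != head])
--
--
-- def codify_proteome(go_dict, hierago_reverse):
--     '''
--     Pure, non-mutating re-implementation: each gene's value is computed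
--     independently (hit terms -> concatenated codes -> recursive dedup),
--     genes are split into a matched and an unmatched segment, and the
--     result dict is assembled once from matched + unmatched.
--     '''
--     matched, unmatched = [], []
--     for gene, go_terms in go_dict.items():
--         hits = [go for go in go_terms if go in hierago_reverse]
--         if hits:
--             codes = [c for go in hits for c in hierago_reverse[go]]
--             matched.append((gene, _dedup(codes)))
--         else:
--             unmatched.append((gene, ['Undefined']))
--     return dict(matched + unmatched)
-- ===== Notes on version B (the rewrite author's own statement) =====
-- stated objective: alternative
-- what changed: B computes each gene's value purely and independently (filter the hit GO terms, concatenate their code lists, dedup by a head-removal recursion) and assembles the result dict once from a matched segment followed by an unmatched segment, instead of A's in-place dict mutation with per-code membership checks against the growing entry and a separate 'Undefined' back-fill pass; Pre_ only excludes association lists with a repeated gene key, which do not represent a Python dict.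
import Mathlib
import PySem

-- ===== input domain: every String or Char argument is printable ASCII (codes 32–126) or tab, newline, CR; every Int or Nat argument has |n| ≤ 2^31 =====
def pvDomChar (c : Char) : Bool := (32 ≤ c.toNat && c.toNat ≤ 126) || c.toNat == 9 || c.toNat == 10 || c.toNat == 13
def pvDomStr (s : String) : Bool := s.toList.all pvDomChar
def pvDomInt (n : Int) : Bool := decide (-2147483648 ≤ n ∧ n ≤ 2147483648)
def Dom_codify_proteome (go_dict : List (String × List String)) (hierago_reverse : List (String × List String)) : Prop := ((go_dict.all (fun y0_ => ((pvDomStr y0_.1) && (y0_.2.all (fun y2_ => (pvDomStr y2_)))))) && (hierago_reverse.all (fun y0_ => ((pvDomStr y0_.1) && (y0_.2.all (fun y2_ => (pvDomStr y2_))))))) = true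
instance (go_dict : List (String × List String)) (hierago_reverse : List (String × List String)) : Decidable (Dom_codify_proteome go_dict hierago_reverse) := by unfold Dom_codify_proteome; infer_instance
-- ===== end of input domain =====

-- B computes each gene's value purely (filter hits, concatenate codes, recursive
-- head-removal dedup) and assembles the dict once from a matched and an
-- unmatched segment, instead of A's in-place dict mutation; objective: alternative.


-- ===== PORT A =====
-- coded_godict[gene].append(code) loop: the net effect of the in-place appends
-- is one overwrite of the gene's entry with the extended list.
def codify_proteome (go_dict : List (String × List String)) (hierago_reverse : List (String × List String)) : List (String × List String) :=
  let h : PySem.Dict String (List String) := PySem.Dict.mk hierago_reverse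
  let coded := go_dict.foldl (fun coded p =>
    p.2.foldl (fun coded go =>
      if h.contains go then
        match coded.get? p.1 with
        | some cur =>
            coded.insert p.1 ((h.getD go []).foldl
              (fun acc code => if code ∈ acc then acc else acc ++ [code]) cur)
        | none =>
            coded.insert p.1 ((h.getD go []).foldl
              (fun acc code => if code ∈ acc then acc else acc ++ [code]) [])
      else coded) coded) PySem.Dict.empty
  (go_dict.foldl (fun coded p =>
    if coded.contains p.1 then coded else coded.insert p.1 ["Undefined"]) coded).items

-- ===== PORT B =====
-- _dedup: keep-first dedup by head-removal recursion (Source B's _dedup)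
def pvDedupB : List String → List String
  | [] => []
  | c :: l => c :: pvDedupB (l.filter (fun x => x ≠ c))
  termination_by l => l.length
  decreasing_by
    simp only [List.length_unattach]
    exact Nat.lt_succ_of_le (le_trans (List.length_filter_le _ _) (le_of_eq (List.length_attach ..)))

def codify_proteome_alt (go_dict : List (String × List String)) (hierago_reverse : List (String × List String)) : List (String × List String) :=
  let h : PySem.Dict String (List String) := PySem.Dict.mk hierago_reverse
  let r := go_dict.foldl (fun (acc : List (String × List String) × List (String × List String)) p =>
    let hits := p.2.filter (fun go => h.contains go)
    if hits ≠ [] then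
      (acc.1 ++ [(p.1, pvDedupB (hits.flatMap (fun go => h.getD go [])))], acc.2)
    else
      (acc.1, acc.2 ++ [(p.1, ["Undefined"])])) ([], [])
  (PySem.Dict.ofList (r.1 ++ r.2)).items

-- ===== PRECONDITION & SPEC =====
-- Pre_ excludes association lists in which a gene key repeats: a Python dict
-- cannot contain a duplicate key, so such lists represent no Python input
-- (A would merge the occurrences where B keeps the last one).
def Pre_codify_proteome (go_dict : List (String × List String)) (hierago_reverse : List (String × List String)) : Prop :=
  (go_dict.map Prod.fst).Nodup
instance (go_dict : List (String × List String)) (hierago_reverse : List (String × List String)) : Decidable (Pre_codify_proteome go_dict hierago_reverse) := by unfold Pre_codify_proteome; infer_instance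
def pvWitness_codify_proteome : (List (String × List String)) × (List (String × List String)) :=
  ([("g1", ["G1", "G2"]), ("g2", ["G3"])], [("G1", ["a", "b"]), ("G2", ["b", "c"])])
def Spec_codify_proteome (go_dict : List (String × List String)) (hierago_reverse : List (String × List String)) (out : List (String × List String)) : Prop := out = codify_proteome_alt go_dict hierago_reverse
instance (go_dict : List (String × List String)) (hierago_reverse : List (String × List String)) (out : List (String × List String)) : Decidable (Spec_codify_proteome go_dict hierago_reverse out) := by unfold Spec_codify_proteome; infer_instance

-- ===== CLAIM (what is proved, stated in full; the proofs are below) =====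
def Claim_equal_codify_proteome : Prop := ∀ (go_dict : List (String × List String)) (hierago_reverse : List (String × List String)), Dom_codify_proteome go_dict hierago_reverse → Pre_codify_proteome go_dict hierago_reverse → Spec_codify_proteome go_dict hierago_reverse (codify_proteome go_dict hierago_reverse)

-- ===== LEMMAS AND PROOFS =====

-- dedup-extend: the effect of A's membership-guarded append loop
def pvDext (acc : List String) (l : List String) : List String :=
  l.foldl (fun a c => if c ∈ a then a else a ++ [c]) acc

-- concatenation of the code lists of the matching go terms
def pvFlat (h : PySem.Dict String (List String)) (gts : List String) : List String :=
  (gts.filter (fun go => h.contains go)).flatMap (fun go => h.getD go [])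

-- A's per-go step, for a fixed gene g
def pvStepA (h : PySem.Dict String (List String)) (g : String)
    (coded : PySem.Dict String (List String)) (go : String) : PySem.Dict String (List String) :=
  if h.contains go then
    match coded.get? g with
    | some cur => coded.insert g ((h.getD go []).foldl (fun acc code => if code ∈ acc then acc else acc ++ [code]) cur)
    | none => coded.insert g ((h.getD go []).foldl (fun acc code => if code ∈ acc then acc else acc ++ [code]) [])
  else coded

-- value A ends up storing for a matched gene
def pvVal (h : PySem.Dict String (List String)) (gts : List String) : List String :=
  pvDext [] (pvFlat h gts)

def pvMatched (h : PySem.Dict String (List String)) (gs : List (String × List String)) : List (String × List String) :=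
  gs.filterMap (fun p => if p.2.any (fun go => h.contains go) then some (p.1, pvVal h p.2) else none)

def pvUndef (h : PySem.Dict String (List String)) (gs : List (String × List String)) : List (String × List String) :=
  gs.filterMap (fun p => if p.2.any (fun go => h.contains go) then none else some (p.1, ["Undefined"]))

theorem pvMatched_cons_pos (h : PySem.Dict String (List String)) (p : String × List String)
    (gs : List (String × List String)) (ha : (p.2.any fun go => h.contains go) = true) :
    pvMatched h (p :: gs) = (p.1, pvVal h p.2) :: pvMatched h gs := by
  simp only [pvMatched, List.filterMap_cons]
  rw [if_pos ha]

theorem pvMatched_cons_neg (h : PySem.Dict String (List String)) (p : String × List String)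
    (gs : List (String × List String)) (ha : ¬ (p.2.any fun go => h.contains go) = true) :
    pvMatched h (p :: gs) = pvMatched h gs := by
  simp only [pvMatched, List.filterMap_cons]
  rw [if_neg ha]

theorem pvUndef_cons_pos (h : PySem.Dict String (List String)) (p : String × List String)
    (gs : List (String × List String)) (ha : (p.2.any fun go => h.contains go) = true) :
    pvUndef h (p :: gs) = pvUndef h gs := by
  simp only [pvUndef, List.filterMap_cons]
  rw [if_pos ha]

theorem pvUndef_cons_neg (h : PySem.Dict String (List String)) (p : String × List String)
    (gs : List (String × List String)) (ha : ¬ (p.2.any fun go => h.contains go) = true) :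
    pvUndef h (p :: gs) = (p.1, ["Undefined"]) :: pvUndef h gs := by
  simp only [pvUndef, List.filterMap_cons]
  rw [if_neg ha]

theorem pvDext_append (a l1 l2 : List String) :
    pvDext a (l1 ++ l2) = pvDext (pvDext a l1) l2 := by
  simp [pvDext]

theorem pvDedupB_nil : pvDedupB [] = [] := by rw [pvDedupB.eq_def]

theorem pvDedupB_cons (c : String) (l : List String) :
    pvDedupB (c :: l) = c :: pvDedupB (l.filter (fun x => x ≠ c)) := by rw [pvDedupB.eq_def]

-- pvDedupB computes the same keep-first dedup as pvDext
theorem pvDext_eq_dedupB (l : List String) (a : List String) :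
    pvDext a l = a ++ pvDedupB (l.filter (fun x => decide (x ∉ a))) := by
  induction l generalizing a with
  | nil => simp [pvDext, pvDedupB_nil]
  | cons c l ih =>
    by_cases hc : c ∈ a
    · have h1 : pvDext a (c :: l) = pvDext a l := by simp [pvDext, hc]
      rw [h1, ih]
      simp [hc]
    · have h1 : pvDext a (c :: l) = pvDext (a ++ [c]) l := by simp [pvDext, hc]
      rw [h1, ih]
      have h2 : (c :: l).filter (fun x => decide (x ∉ a)) =
          c :: l.filter (fun x => decide (x ∉ a)) := by simp [hc]
      rw [h2, pvDedupB_cons]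
      have h3 : (l.filter (fun x => decide (x ∉ a))).filter (fun x => x ≠ c) =
          l.filter (fun x => decide (x ∉ a ++ [c])) := by
        rw [List.filter_filter]
        apply List.filter_congr
        intro x _
        by_cases hx : x = c <;> by_cases hxa : x ∈ a <;> simp [hx, hxa]
      rw [h3]
      simp

theorem pvDedupB_eq_dext (l : List String) : pvDedupB l = pvDext [] l := by
  rw [pvDext_eq_dedupB]
  simp

theorem pvA_inner_some (h : PySem.Dict String (List String)) (g : String)
    (gts : List String) (d : PySem.Dict String (List String)) (v : List String)
    (hv : d.get? g = some v) :
    gts.foldl (pvStepA h g) d =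
      if gts.any (fun go => h.contains go) then d.insert g (pvDext v (pvFlat h gts)) else d := by
  induction gts generalizing d v with
  | nil => simp
  | cons go gts ih =>
    by_cases hm : h.contains go = true
    · have hstep : pvStepA h g d go = d.insert g (pvDext v (h.getD go [])) := by
        simp [pvStepA, hm, hv, pvDext]
      rw [List.foldl_cons, hstep,
        ih _ _ (PySem.Dict.get?_insert_self d g (pvDext v (h.getD go [])))]
      have hflat : pvFlat h (go :: gts) = h.getD go [] ++ pvFlat h gts := by
        simp [pvFlat, hm]
      simp only [List.any_cons, hm, Bool.true_or, if_true, hflat, pvDext_append]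
      by_cases ha : gts.any (fun go => h.contains go) = true
      · simp only [ha, if_true, PySem.Dict.insert_insert_self]
      · have hfl : pvFlat h gts = [] := by
          simp only [pvFlat]
          rw [List.filter_eq_nil_iff.mpr (by simpa using ha)]
          rfl
        simp only [ha, Bool.false_eq_true, if_false, hfl]
        rfl
    · have hstep : pvStepA h g d go = d := by simp [pvStepA, hm]
      rw [List.foldl_cons, hstep, ih _ _ hv]
      simp [pvFlat, hm]

theorem pvA_inner_none (h : PySem.Dict String (List String)) (g : String)
    (gts : List String) (d : PySem.Dict String (List String))
    (hv : d.get? g = none) :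
    gts.foldl (pvStepA h g) d =
      if gts.any (fun go => h.contains go) then d.insert g (pvVal h gts) else d := by
  induction gts with
  | nil => simp
  | cons go gts ih =>
    by_cases hm : h.contains go = true
    · have hstep : pvStepA h g d go = d.insert g (pvDext [] (h.getD go [])) := by
        simp [pvStepA, hm, hv, pvDext]
      rw [List.foldl_cons, hstep,
        pvA_inner_some h g gts _ _ (PySem.Dict.get?_insert_self d g (pvDext [] (h.getD go [])))]
      have hflat : pvFlat h (go :: gts) = h.getD go [] ++ pvFlat h gts := by
        simp [pvFlat, hm]
      simp only [List.any_cons, hm, Bool.true_or, if_true, pvVal, hflat, pvDext_append]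
      by_cases ha : gts.any (fun go => h.contains go) = true
      · simp only [ha, if_true, PySem.Dict.insert_insert_self]
      · have hfl : pvFlat h gts = [] := by
          simp only [pvFlat]
          rw [List.filter_eq_nil_iff.mpr (by simpa using ha)]
          rfl
        simp only [ha, Bool.false_eq_true, if_false, hfl]
        rfl
    · have hstep : pvStepA h g d go = d := by simp [pvStepA, hm]
      rw [List.foldl_cons, hstep, ih]
      simp [pvVal, pvFlat, hm]

-- A's first phase from a dict fresh for all genes: items gain exactly pvMatched
theorem pvPhase1 (h : PySem.Dict String (List String)) (gs : List (String × List String))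
    (d : PySem.Dict String (List String))
    (hfresh : ∀ p ∈ gs, d.contains p.1 = false) (hnd : (gs.map Prod.fst).Nodup)
    (hk : d.keys.Nodup) :
    (gs.foldl (fun coded p => p.2.foldl (pvStepA h p.1) coded) d).items
      = d.items ++ pvMatched h gs := by
  induction gs generalizing d with
  | nil => simp [pvMatched]
  | cons p gs ih =>
    simp only [List.map_cons, List.nodup_cons] at hnd
    have hfp : d.contains p.1 = false := hfresh p (List.mem_cons_self ..)
    have hget : d.get? p.1 = none := by
      rw [PySem.Dict.get?_eq_none_iff_contains]
      simpa using hfp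
    rw [List.foldl_cons, pvA_inner_none h p.1 p.2 d hget]
    by_cases ha : (p.2.any fun go => h.contains go) = true
    · rw [if_pos ha, pvMatched_cons_pos h p gs ha]
      have hfresh' : ∀ q ∈ gs, (d.insert p.1 (pvVal h p.2)).contains q.1 = false := by
        intro q hq
        have hne : q.1 ≠ p.1 := fun hqp => hnd.1 (hqp ▸ List.mem_map_of_mem (f := Prod.fst) hq)
        rw [PySem.Dict.contains_insert]
        simp [hne, hfresh q (List.mem_cons_of_mem _ hq)]
      rw [ih _ hfresh' hnd.2 (PySem.Dict.nodup_keys_insert d p.1 _ hk),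
        PySem.Dict.items_insert_of_not_contains d _ (by simpa using hfp)]
      simp
    · rw [if_neg ha, pvMatched_cons_neg h p gs ha,
        ih d (fun q hq => hfresh q (List.mem_cons_of_mem _ hq)) hnd.2 hk]

-- A's second phase: items gain an 'Undefined' entry per gene not in d
theorem pvPhase2 (gs : List (String × List String))
    (d : PySem.Dict String (List String)) (hnd : (gs.map Prod.fst).Nodup) :
    (gs.foldl (fun coded p =>
        if coded.contains p.1 then coded else coded.insert p.1 ["Undefined"]) d).items
      = d.items ++ gs.filterMap (fun p =>
          if d.contains p.1 then none else some (p.1, ["Undefined"])) := by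
  induction gs generalizing d with
  | nil => simp
  | cons p gs ih =>
    simp only [List.map_cons, List.nodup_cons] at hnd
    rw [List.foldl_cons, List.filterMap_cons]
    by_cases hc : d.contains p.1 = true
    · rw [if_pos hc, if_pos hc, ih d hnd.2]
    · rw [if_neg hc, if_neg hc, ih _ hnd.2,
        PySem.Dict.items_insert_of_not_contains d _ (by simpa using hc)]
      have hcong : gs.filterMap (fun q =>
            if (d.insert p.1 ["Undefined"]).contains q.1 then none
            else some (q.1, ["Undefined"]))
          = gs.filterMap (fun q =>
            if d.contains q.1 then none else some (q.1, ["Undefined"])) := by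
        apply List.filterMap_congr
        intro q hq
        have hne : q.1 ≠ p.1 := fun hqp => hnd.1 (hqp ▸ List.mem_map_of_mem (f := Prod.fst) hq)
        rw [PySem.Dict.contains_insert]
        simp [hne]
      rw [hcong]
      simp

-- B's gather loop: the pair of segments it accumulates
theorem pvBfold (h : PySem.Dict String (List String)) (gs : List (String × List String))
    (m u : List (String × List String)) :
    gs.foldl (fun (acc : List (String × List String) × List (String × List String)) p =>
        let hits := p.2.filter (fun go => h.contains go)
        if hits ≠ [] then
          (acc.1 ++ [(p.1, pvDedupB (hits.flatMap (fun go => h.getD go [])))], acc.2)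
        else
          (acc.1, acc.2 ++ [(p.1, ["Undefined"])])) (m, u)
      = (m ++ pvMatched h gs, u ++ pvUndef h gs) := by
  induction gs generalizing m u with
  | nil => simp [pvMatched, pvUndef]
  | cons p gs ih =>
    rw [List.foldl_cons]
    by_cases ha : (p.2.any fun go => h.contains go) = true
    · have hne : p.2.filter (fun go => h.contains go) ≠ [] := by
        rw [Ne, List.filter_eq_nil_iff]
        simp only [List.any_eq_true] at ha
        obtain ⟨go, hgo, hgoc⟩ := ha
        intro hall
        exact absurd hgoc (by simpa using hall go hgo)
      show (gs.foldl _ (if (p.2.filter (fun go => h.contains go)) ≠ [] then _ else _)) = _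
      rw [if_pos hne, ih, pvMatched_cons_pos h p gs ha, pvUndef_cons_pos h p gs ha]
      have hval : pvDedupB ((p.2.filter (fun go => h.contains go)).flatMap (fun go => h.getD go []))
          = pvVal h p.2 := by
        rw [pvDedupB_eq_dext]
        rfl
      rw [hval]
      simp
    · have ha' : ∀ go ∈ p.2, h.contains go = false := by simpa using ha
      have hnil : p.2.filter (fun go => h.contains go) = [] :=
        List.filter_eq_nil_iff.mpr (fun a haa => by simp [ha' a haa])
      show (gs.foldl _ (if (p.2.filter (fun go => h.contains go)) ≠ [] then _ else _)) = _
      rw [if_neg (by simp [hnil]), ih, pvMatched_cons_neg h p gs ha, pvUndef_cons_neg h p gs ha]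
      simp
-- keys of the matched and undefined segments
theorem pvMatched_keys (h : PySem.Dict String (List String)) (gs : List (String × List String)) :
    (pvMatched h gs).map Prod.fst
      = (gs.filter (fun p => p.2.any (fun go => h.contains go))).map Prod.fst := by
  induction gs with
  | nil => rfl
  | cons p gs ih =>
    by_cases ha : (p.2.any fun go => h.contains go) = true
    · rw [pvMatched_cons_pos h p gs ha, List.filter_cons, if_pos (by simpa using ha)]
      simp [ih]
    · rw [pvMatched_cons_neg h p gs ha, List.filter_cons, if_neg (by simpa using ha), ih]

theorem pvUndef_keys (h : PySem.Dict String (List String)) (gs : List (String × List String)) :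
    (pvUndef h gs).map Prod.fst
      = (gs.filter (fun p => !p.2.any (fun go => h.contains go))).map Prod.fst := by
  induction gs with
  | nil => rfl
  | cons p gs ih =>
    by_cases ha : (p.2.any fun go => h.contains go) = true
    · rw [pvUndef_cons_pos h p gs ha, List.filter_cons, if_neg (by simp [ha]), ih]
    · rw [pvUndef_cons_neg h p gs ha, List.filter_cons, if_pos (by simpa using ha)]
      simp [ih]

-- ofList (= dict(pairs)) on a nodup-keyed list returns exactly that list
theorem pvOfList_items (l : List (String × List String)) (hnd : (l.map Prod.fst).Nodup) :
    (PySem.Dict.ofList l).items = l := by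
  have h := PySem.Dict.items_foldl_insert_fresh l Prod.fst Prod.snd PySem.Dict.empty
    (fun a _ => PySem.Dict.contains_empty _) hnd
  simpa using h

-- membership in the phase-1 dict, for a gene of the (nodup-keyed) input list
theorem pvContains_matched (h : PySem.Dict String (List String))
    (gs : List (String × List String)) (hnd : (gs.map Prod.fst).Nodup)
    (p : String × List String) (hp : p ∈ gs) :
    (p.1 ∈ (pvMatched h gs).map Prod.fst) ↔ (p.2.any fun go => h.contains go) = true := by
  rw [pvMatched_keys]
  constructor
  · intro hmem
    simp only [List.mem_map] at hmem
    obtain ⟨q, hq, hq1⟩ := hmem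
    rw [List.mem_filter] at hq
    have := List.inj_on_of_nodup_map hnd (hq.1) hp hq1
    rw [← this]
    exact hq.2
  · intro ha
    exact List.mem_map_of_mem (f := Prod.fst) (List.mem_filter.mpr ⟨hp, ha⟩)

-- ===== VERDICT (by name: the statement is the Claim_ definition above) =====
theorem codify_proteome_spec : Claim_equal_codify_proteome := by
  intro go_dict hierago_reverse _ hpre
  unfold Spec_codify_proteome
  -- A's value, with the inner loop recognised as pvStepA (definitional)
  have hA : codify_proteome go_dict hierago_reverse
      = (go_dict.foldl (fun coded p =>
          if coded.contains p.1 then coded else coded.insert p.1 ["Undefined"])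
          (go_dict.foldl (fun coded p => p.2.foldl (pvStepA (PySem.Dict.mk hierago_reverse) p.1) coded)
            PySem.Dict.empty)).items := rfl
  -- B's value (definitional)
  have hB : codify_proteome_alt go_dict hierago_reverse
      = (PySem.Dict.ofList
          ((go_dict.foldl (fun (acc : List (String × List String) × List (String × List String)) p =>
              let hits := p.2.filter (fun go => (PySem.Dict.mk hierago_reverse).contains go)
              if hits ≠ [] then
                (acc.1 ++ [(p.1, pvDedupB (hits.flatMap (fun go => (PySem.Dict.mk hierago_reverse).getD go [])))], acc.2)
              else
                (acc.1, acc.2 ++ [(p.1, ["Undefined"])])) ([], [])).1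
            ++ (go_dict.foldl (fun (acc : List (String × List String) × List (String × List String)) p =>
              let hits := p.2.filter (fun go => (PySem.Dict.mk hierago_reverse).contains go)
              if hits ≠ [] then
                (acc.1 ++ [(p.1, pvDedupB (hits.flatMap (fun go => (PySem.Dict.mk hierago_reverse).getD go [])))], acc.2)
              else
                (acc.1, acc.2 ++ [(p.1, ["Undefined"])])) ([], [])).2)).items := rfl
  -- A's phase-1 dict
  have h1 := pvPhase1 (PySem.Dict.mk hierago_reverse) go_dict PySem.Dict.empty
    (fun p _ => PySem.Dict.contains_empty _) hpre PySem.Dict.nodup_keys_empty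
  set d1 := go_dict.foldl (fun coded p => p.2.foldl (pvStepA (PySem.Dict.mk hierago_reverse) p.1) coded) PySem.Dict.empty with hd1
  have hitems1 : d1.items = pvMatched (PySem.Dict.mk hierago_reverse) go_dict := by simpa using h1
  have hkeys1 : d1.keys = (pvMatched (PySem.Dict.mk hierago_reverse) go_dict).map Prod.fst := by
    show d1.items.map Prod.fst = _
    rw [hitems1]
  -- the undefined segment of A = pvUndef
  have hund : go_dict.filterMap (fun p =>
      if d1.contains p.1 then none else some (p.1, ["Undefined"]))
      = pvUndef (PySem.Dict.mk hierago_reverse) go_dict := by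
    apply List.filterMap_congr
    intro p hp
    have hcm : d1.contains p.1 = true ↔ p.1 ∈ (pvMatched (PySem.Dict.mk hierago_reverse) go_dict).map Prod.fst := by
      rw [PySem.Dict.contains_iff_mem_keys, hkeys1]
    by_cases ha : (p.2.any fun go => (PySem.Dict.mk hierago_reverse).contains go) = true
    · have hc : d1.contains p.1 = true :=
        hcm.mpr ((pvContains_matched _ go_dict hpre p hp).mpr ha)
      rw [if_pos hc, if_pos ha]
    · have hc : ¬ d1.contains p.1 = true := by
        intro hcc
        exact ha ((pvContains_matched _ go_dict hpre p hp).mp (hcm.mp hcc))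
      rw [if_neg hc, if_neg ha]
  -- nodup keys of B's assembled list
  have hnodup : ((pvMatched (PySem.Dict.mk hierago_reverse) go_dict
      ++ pvUndef (PySem.Dict.mk hierago_reverse) go_dict).map Prod.fst).Nodup := by
    rw [List.map_append, List.nodup_append, pvMatched_keys, pvUndef_keys]
    refine ⟨(List.nodup_map_iff_inj_on ?_).mpr ?_, (List.nodup_map_iff_inj_on ?_).mpr ?_, ?_⟩
    · exact List.Sublist.nodup List.filter_sublist (List.Nodup.of_map _ hpre)
    · intro x hx y hy hxy
      exact List.inj_on_of_nodup_map hpre (List.Sublist.subset List.filter_sublist hx)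
        (List.Sublist.subset List.filter_sublist hy) hxy
    · exact List.Sublist.nodup List.filter_sublist (List.Nodup.of_map _ hpre)
    · intro x hx y hy hxy
      exact List.inj_on_of_nodup_map hpre (List.Sublist.subset List.filter_sublist hx)
        (List.Sublist.subset List.filter_sublist hy) hxy
    · intro a ha b hb
      obtain ⟨q, hq, hq1⟩ := List.mem_map.mp ha
      obtain ⟨r, hr, hr1⟩ := List.mem_map.mp hb
      rw [List.mem_filter] at hq hr
      intro hab
      have hqr : q = r := List.inj_on_of_nodup_map hpre hq.1 hr.1 (by rw [hq1, hr1, hab])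
      exact absurd (hqr ▸ hq.2) (by simpa using hr.2)
  rw [hA, hB, pvBfold, pvPhase2 go_dict d1 hpre, hitems1, hund]
  dsimp only
  rw [List.nil_append, List.nil_append, pvOfList_items _ hnodup]
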